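-- pv_equiv track=rewrite | github.com/ZBWalters/LBL_pythonscripts | twoDplot.py | lohiindx
-- ===== SOURCE A (Python) =====
-- def lohiindx(x,lst):
--     #takes a sorted list as input, returns indices i,j st
--     #lst[i]<=x<=lst[j] and j=i+1
--     loindx=0
--     hiindx=len(lst)-1
--     if(x<lst[0]):
--         loindx=0
--         hiindx=0
--     if(x>lst[-1]):
--         loindx=hiindx
--     while((hiindx-loindx)>1):
--         midindx=int(floor((loindx+hiindx)/2))
--         if(x>=lst[midindx]):
--             loindx=midindx
--         else:
--             hiindx=midindx
--     return loindx,hiindx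
-- ===== SOURCE B (Python) =====
-- def lohiindx(x, lst):
--     # Linear scan instead of binary search: find the first index k with
--     # lst[k] > x and bracket it as (k-1, k); clamp at both ends.
--     n = len(lst)
--     if n == 1 or x < lst[0]:
--         return (0, 0)
--     if x > lst[-1]:
--         return (n - 1, n - 1)
--     for k in range(1, n):
--         if lst[k] > x:
--             return (k - 1, k)
--     return (n - 2, n - 1)
-- ===== Notes on version B (the rewrite author's own statement) =====
-- stated objective: simpler
-- what changed: Replaces the in-place binary search loop with edge-case returns plus a single left-to-right scan for the first element exceeding x.
-- outside the precondition, e.g. on lohiindx(5, [0, 9, 0, 0, 9]): A raises NameError, B returns (0, 1); on lohiindx(3, []): A raises IndexError, B raises IndexError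
import Mathlib
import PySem

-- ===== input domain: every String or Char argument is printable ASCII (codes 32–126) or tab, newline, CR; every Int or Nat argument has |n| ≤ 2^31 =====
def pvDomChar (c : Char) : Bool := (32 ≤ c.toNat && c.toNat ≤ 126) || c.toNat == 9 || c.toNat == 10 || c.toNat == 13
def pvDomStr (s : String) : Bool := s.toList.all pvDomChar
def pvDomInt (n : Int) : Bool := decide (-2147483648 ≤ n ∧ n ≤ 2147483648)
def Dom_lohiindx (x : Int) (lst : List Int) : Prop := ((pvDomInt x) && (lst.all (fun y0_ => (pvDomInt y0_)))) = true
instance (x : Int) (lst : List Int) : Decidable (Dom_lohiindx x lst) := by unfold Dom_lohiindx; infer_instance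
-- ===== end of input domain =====

-- B replaces the binary search with edge-case returns plus a single linear scan
-- for the first element exceeding x (simpler, same results on sorted input).


-- ===== PORT A =====
-- the while loop of A; indices are always in range on Pre_ inputs, so lst[mid] is pyGetD _ _ 0.
-- int(floor((lo+hi)/2)) equals floor division by 2 exactly for |indices| ≤ 2^31 (floats are exact there).
def lohiLoopA (x : Int) (lst : List Int) (loindx hiindx : Int) : Int × Int :=
  if _h : hiindx - loindx > 1 then
    let midindx := PySem.Int.floordiv (loindx + hiindx) 2
    if x ≥ PySem.List.pyGetD lst midindx 0 then
      lohiLoopA x lst midindx hiindx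
    else
      lohiLoopA x lst loindx midindx
  else
    (loindx, hiindx)
termination_by (hiindx - loindx).toNat
decreasing_by
  all_goals
    have h2 := PySem.Int.floordiv_two_mid_bounds (lo := loindx) (hi := hiindx) (by omega)
    have h3 : PySem.Int.floordiv (loindx + hiindx) 2 = (loindx + hiindx) / 2 :=
      PySem.Int.floordiv_eq_ediv_of_pos (by omega)
    omega

def lohiindx (x : Int) (lst : List Int) : Int × Int :=
  let loindx : Int := 0
  let hiindx : Int := (lst.length : Int) - 1
  let (loindx, hiindx) :=
    if x < PySem.List.pyGetD lst 0 0 then (0, 0) else (loindx, hiindx)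
  let loindx := if x > PySem.List.pyGetD lst (-1) 0 then hiindx else loindx
  lohiLoopA x lst loindx hiindx

-- ===== PORT B =====
-- the for-loop of B: scan k = start, start+1, …, n-1 for the first lst[k] > x
def altScan (x : Int) (lst : List Int) (k : Nat) : Int × Int :=
  if h : k < lst.length then
    if lst[k] > x then ((k : Int) - 1, (k : Int))
    else altScan x lst (k + 1)
  else ((lst.length : Int) - 2, (lst.length : Int) - 1)
termination_by lst.length - k

def lohiindx_alt (x : Int) (lst : List Int) : Int × Int :=
  let n : Int := (lst.length : Int)
  if n = 1 ∨ x < PySem.List.pyGetD lst 0 0 then (0, 0)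
  else if x > PySem.List.pyGetD lst (-1) 0 then (n - 1, n - 1)
  else altScan x lst 1

-- ===== PRECONDITION & SPEC =====
-- Pre_ excludes the empty list (A raises IndexError at lst[0]) and unsorted lists of
-- length ≥ 3 whose binary-search region is actually probed (lst[0] ≤ x ≤ lst[-1]): the
-- function is documented 'takes a sorted list as input', and there the binary-search
-- result is an artefact of the probe order that a linear scan cannot share.
def Pre_lohiindx (x : Int) (lst : List Int) : Prop :=
  lst ≠ [] ∧ (List.Pairwise (· ≤ ·) lst ∨ lst.length ≤ 2 ∨
    x < PySem.List.pyGetD lst 0 0 ∨ x > PySem.List.pyGetD lst (-1) 0)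
instance (x : Int) (lst : List Int) : Decidable (Pre_lohiindx x lst) := by
  unfold Pre_lohiindx; infer_instance

def pvWitness_lohiindx : Int × List Int := (2, [1, 3])

def Spec_lohiindx (x : Int) (lst : List Int) (out : Int × Int) : Prop := out = lohiindx_alt x lst
instance (x : Int) (lst : List Int) (out : Int × Int) : Decidable (Spec_lohiindx x lst out) := by unfold Spec_lohiindx; infer_instance

-- ===== CLAIM (what is proved, stated in full; the proofs are below) =====
def Claim_equal_lohiindx : Prop := ∀ (x : Int) (lst : List Int), Dom_lohiindx x lst → Pre_lohiindx x lst → Spec_lohiindx x lst (lohiindx x lst)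

-- ===== LEMMAS AND PROOFS =====

-- monotone access from sortedness
theorem sorted_mono (lst : List Int) (hs : List.Pairwise (· ≤ ·) lst) :
    ∀ i j (hi : i < lst.length) (hj : j < lst.length), i ≤ j → lst[i] ≤ lst[j] := by
  intro i j hi hj hij
  rcases Nat.lt_or_eq_of_le hij with h | h
  · exact (List.pairwise_iff_getElem.mp hs) i j hi hj h
  · subst h; exact le_refl _

-- characterization of A's binary-search loop on a sorted list
theorem loopA_char (x : Int) (lst : List Int)
    (hmono : ∀ i j (hi : i < lst.length) (hj : j < lst.length), i ≤ j → lst[i] ≤ lst[j])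
    (lo hi : Int) (h0 : 0 ≤ lo) (hlh : lo < hi) (hhn : hi ≤ (lst.length : Int) - 1)
    (hlo : PySem.List.pyGetD lst lo 0 ≤ x)
    (hhi : x < PySem.List.pyGetD lst hi 0 ∨ hi = (lst.length : Int) - 1) :
    ∃ (l : Nat) (h : l + 1 < lst.length),
      lohiLoopA x lst lo hi = ((l : Int), (l : Int) + 1) ∧
      lst[l]'(Nat.lt_of_succ_lt h) ≤ x ∧
      (x < lst[l+1]'h ∨ l + 2 = lst.length) := by
  rw [lohiLoopA]
  by_cases hgap : hi - lo > 1
  · rw [dif_pos hgap]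
    have hde : PySem.Int.floordiv (lo + hi) 2 = (lo + hi) / 2 :=
      PySem.Int.floordiv_eq_ediv_of_pos (by omega)
    have hmid : lo < PySem.Int.floordiv (lo + hi) 2 ∧ PySem.Int.floordiv (lo + hi) 2 < hi := by
      rw [hde]; omega
    by_cases hge : x ≥ PySem.List.pyGetD lst (PySem.Int.floordiv (lo + hi) 2) 0
    · rw [if_pos hge]
      exact loopA_char x lst hmono _ hi (by omega) (by omega) hhn hge hhi
    · rw [if_neg hge]
      exact loopA_char x lst hmono lo _ h0 (by omega) (by omega) hlo (Or.inl (by omega))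
  · rw [dif_neg hgap]
    have hhi1 : hi = lo + 1 := by omega
    have hn2 : lo.toNat + 1 < lst.length := by omega
    refine ⟨lo.toNat, hn2, ⟨by simp; omega, ?_, ?_⟩⟩
    · rw [PySem.List.pyGetD_eq_getElem lst 0 h0 (by omega)] at hlo; exact hlo
    · rcases hhi with h | h
      · left
        rw [PySem.List.pyGetD_eq_getElem lst 0 (by omega) (by omega)] at h
        have he : hi.toNat = lo.toNat + 1 := by omega
        simpa [he] using h
      · right; omega
termination_by (hi - lo).toNat
decreasing_by
  all_goals rw [hde]; omega

-- B's scan reaches exactly the bracket characterized above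
theorem scan_char (x : Int) (lst : List Int)
    (hmono : ∀ i j (hi : i < lst.length) (hj : j < lst.length), i ≤ j → lst[i] ≤ lst[j])
    (l : Nat) (hl : l + 1 < lst.length)
    (hlx : lst[l]'(Nat.lt_of_succ_lt hl) ≤ x)
    (hcase : x < lst[l+1]'hl ∨ l + 2 = lst.length)
    (k : Nat) (hk1 : 1 ≤ k) (hkl : k ≤ l + 1)
    (hbelow : ∀ j (hj : j < lst.length), j < k → lst[j] ≤ x) :
    altScan x lst k = ((l : Int), (l : Int) + 1) := by
  have hkn : k < lst.length := by omega
  rw [altScan, dif_pos hkn]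
  by_cases hgt : lst[k] > x
  · rw [if_pos hgt]
    have hkgt : l < k := by
      by_contra hc
      have h1 := hmono k l hkn (Nat.lt_of_succ_lt hl) (by omega)
      omega
    have hk : k = l + 1 := by omega
    subst hk; simp only [Prod.mk.injEq]; omega
  · rw [if_neg hgt]
    by_cases hkle : k ≤ l
    · exact scan_char x lst hmono l hl hlx hcase (k+1) (by omega) (by omega)
        (fun j hj hjk => by
          rcases Nat.lt_or_eq_of_le (Nat.le_of_lt_succ hjk) with h | h
          · exact hbelow j hj h
          · subst h; omega)
    · have hk : k = l + 1 := by omega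
      subst hk
      rcases hcase with h | h
      · omega
      · rw [altScan, dif_neg (by omega)]
        simp only [Prod.mk.injEq]; omega
termination_by lst.length - k

-- ===== VERDICT (by name: the statement is the Claim_ definition above) =====
theorem lohiindx_spec : Claim_equal_lohiindx := by
  intro x lst _hdom hpre
  obtain ⟨hne, hor⟩ := hpre
  unfold Spec_lohiindx
  have hn1 : 1 ≤ lst.length := List.length_pos_iff.mpr hne
  by_cases hone : lst.length = 1
  · obtain ⟨a, ha⟩ : ∃ a, lst = [a] := by
      match lst, hone with | [a], _ => exact ⟨a, rfl⟩
    subst ha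
    have hB : lohiindx_alt x [a] = (0, 0) := by
      simp only [lohiindx_alt, List.length_cons, List.length_nil]
      rw [if_pos (Or.inl (by norm_num))]
    rw [hB]
    simp only [lohiindx, List.length_cons, List.length_nil]
    split_ifs <;> (rw [lohiLoopA]; norm_num)
  · have hn2 : 2 ≤ lst.length := by omega
    have h0get : PySem.List.pyGetD lst 0 0 = lst[0]'(by omega) :=
      PySem.List.pyGetD_eq_getElem lst 0 (by omega) (by omega)
    have hlastget : PySem.List.pyGetD lst (-1) 0 = lst[lst.length - 1]'(by omega) := by
      rw [PySem.List.pyGetD_neg_ofNat lst 1 0 (by omega) (by omega)]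
    by_cases hlt : x < PySem.List.pyGetD lst 0 0
    · have hA : lohiindx x lst = (0, 0) := by
        simp only [lohiindx, if_pos hlt]
        split_ifs <;> (rw [lohiLoopA]; norm_num)
      have hB : lohiindx_alt x lst = (0, 0) := by
        simp only [lohiindx_alt, if_pos (Or.inr hlt)]
      rw [hA, hB]
    · by_cases hgt : x > PySem.List.pyGetD lst (-1) 0
      · have hA : lohiindx x lst = ((lst.length : Int) - 1, (lst.length : Int) - 1) := by
          simp only [lohiindx, if_neg hlt, if_pos hgt]
          rw [lohiLoopA]; norm_num
        have hB : lohiindx_alt x lst = ((lst.length : Int) - 1, (lst.length : Int) - 1) := by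
          have hc1 : ¬ ((lst.length : Int) = 1 ∨ x < PySem.List.pyGetD lst 0 0) := by
            push Not; exact ⟨by omega, by omega⟩
          simp only [lohiindx_alt, if_neg hc1, if_pos hgt]
        rw [hA, hB]
      · rcases hor with hsort | hle | hbad | hbad
        case neg.inr.inl =>
          -- length exactly 2: both sides return (0, 1) whatever the contents
          obtain ⟨a, b, hab⟩ : ∃ a b, lst = [a, b] := by
            have h2 : lst.length = 2 := by omega
            match lst, h2 with | [a, b], _ => exact ⟨a, b, rfl⟩
          subst hab
          have hA : lohiindx x [a, b] = (0, 1) := by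
            simp only [lohiindx, if_neg hlt, if_neg hgt]
            rw [lohiLoopA]; norm_num
          have hB : lohiindx_alt x [a, b] = (0, 1) := by
            have hc1 : ¬ ((([a, b].length : Nat) : Int) = 1 ∨ x < PySem.List.pyGetD [a, b] 0 0) := by
              push Not; exact ⟨by norm_num, by omega⟩
            simp only [lohiindx_alt, if_neg hc1, if_neg hgt]
            rw [altScan]
            norm_num
            intro _
            rw [altScan]; norm_num
          rw [hA, hB]
        case neg.inr.inr.inl => exact absurd hbad hlt
        case neg.inr.inr.inr => exact absurd hbad hgt
        have hmono := sorted_mono lst hsort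
        obtain ⟨l, hl, heq, hlx, hcase⟩ :=
          loopA_char x lst hmono 0 ((lst.length : Int) - 1) (by omega) (by omega) (by omega)
            (by omega)
            (by right; rfl)
        have hbelow : ∀ j (hj : j < lst.length), j < 1 → lst[j] ≤ x := by
          intro j hj hj1
          have hj0 : j = 0 := by omega
          subst hj0
          rw [h0get] at hlt; omega
        have hscan := scan_char x lst hmono l hl hlx hcase 1 (by omega) (by omega) hbelow
        have hA : lohiindx x lst = ((l : Int), (l : Int) + 1) := by
          simp only [lohiindx, if_neg hlt, if_neg hgt]
          exact heq
        have hB : lohiindx_alt x lst = ((l : Int), (l : Int) + 1) := by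
          have hc1 : ¬ ((lst.length : Int) = 1 ∨ x < PySem.List.pyGetD lst 0 0) := by
            push Not; exact ⟨by omega, by omega⟩
          simp only [lohiindx_alt, if_neg hc1, if_neg hgt]
          exact hscan
        rw [hA, hB]
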